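-- pv_equiv track=rewrite | github.com/John5199/IoT_Simulation | models/telegramBot.py | getNewData
-- ===== SOURCE A (Python) =====
-- def getNewData(archivo, subs):
--     resultado = {}
--     for plc_id, sensores in subs.items():
--         valores = {}
--         for row in reversed(archivo):
--             if row[2] == str(plc_id) and row[3] in sensores:
--                 if row[3] not in valores:
--                     valores[row[3]] = {
--                         "valor": row[4],
--                         "fecha": row[0],
--                         "hora": row[1]
--                     }
--             if len(valores) == len(sensores):
--                 break
--         if valores:
--             resultado[plc_id] = valores
--     return resultado
-- ===== SOURCE B (Python) =====
-- def getNewData(archivo, subs):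
--     wanted = {plc: set(ss) for plc, ss in subs.items()}
--     found = {}
--     for row in reversed(archivo):
--         plc, sensor = row[2], row[3]
--         if plc in wanted and sensor in wanted[plc]:
--             valores = found.setdefault(plc, {})
--             if sensor not in valores:
--                 valores[sensor] = {"valor": row[4], "fecha": row[0], "hora": row[1]}
--     return {plc: found[plc] for plc in subs if plc in found}
-- ===== Notes on version B (the rewrite author's own statement) =====
-- stated objective: faster
-- what changed: A rescans the whole log once per subscribed PLC (with an early break); B makes a single reverse pass over the log, collecting the latest value per (plc, sensor) into a dict of dicts keyed by PLC, and then assembles the result in subs order by lookup only.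
-- outside the precondition, e.g. on getNewData([[]], {}): A returns {}, B raises IndexError
import Mathlib
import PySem

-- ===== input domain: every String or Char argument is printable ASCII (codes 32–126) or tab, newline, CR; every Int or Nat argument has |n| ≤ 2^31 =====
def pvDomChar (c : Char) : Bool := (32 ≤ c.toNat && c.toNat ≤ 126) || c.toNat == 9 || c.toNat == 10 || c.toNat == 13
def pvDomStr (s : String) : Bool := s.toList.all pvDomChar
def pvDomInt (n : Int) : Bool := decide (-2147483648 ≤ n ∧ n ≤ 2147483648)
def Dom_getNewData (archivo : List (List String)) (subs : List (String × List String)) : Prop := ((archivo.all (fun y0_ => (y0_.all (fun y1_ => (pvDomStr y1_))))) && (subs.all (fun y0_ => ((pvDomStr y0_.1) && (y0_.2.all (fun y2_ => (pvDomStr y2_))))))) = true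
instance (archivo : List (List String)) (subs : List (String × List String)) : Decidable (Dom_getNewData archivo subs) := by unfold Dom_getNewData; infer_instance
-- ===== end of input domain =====

-- B replaces A's per-subscription rescan of the whole log with ONE reverse pass indexed by (plc, sensor); equivalence proved on rows long enough for A's indexing and subs with distinct plc keys.

-- ===== PORT A =====
-- inner loop of A over reversed(archivo) for one subscription, with the early 'break'
def getNewDataInner (plc : String) (sens : List String) :
    List (List String) → PySem.Dict String (List (String × String)) → PySem.Dict String (List (String × String))
  | [], val => val
  | row :: rest, val =>
    let val' :=
      if (PySem.List.pyGetD row 2 "" == plc) && sens.contains (PySem.List.pyGetD row 3 "") then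
        if val.contains (PySem.List.pyGetD row 3 "") then val
        else val.insert (PySem.List.pyGetD row 3 "")
          [("valor", PySem.List.pyGetD row 4 ""), ("fecha", PySem.List.pyGetD row 0 ""), ("hora", PySem.List.pyGetD row 1 "")]
      else val
    if val'.size == sens.length then val'
    else getNewDataInner plc sens rest val'

-- 'row[2] == str(plc_id)': the plc ids are strings, str() is the identity; 'subs.items()' is the assoc list itself (keys distinct under Pre_)
def getNewData (archivo : List (List String)) (subs : List (String × List String)) :
    List (String × List (String × List (String × String))) :=
  (subs.foldl (fun res p =>
      let val := getNewDataInner p.1 p.2 archivo.reverse PySem.Dict.empty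
      if val.items.isEmpty then res else res.insert p.1 val.items)
    PySem.Dict.empty).items

-- ===== PORT B =====
def altWanted (subs : List (String × List String)) : PySem.Dict String (PySem.Set String) :=
  subs.foldl (fun d p => d.insert p.1 (PySem.Set.ofList p.2)) PySem.Dict.empty

-- the single reverse pass: found[plc][sensor] = latest info, in first-encounter (= latest) order
def altPass (wanted : PySem.Dict String (PySem.Set String)) :
    List (List String) → PySem.Dict String (PySem.Dict String (List (String × String))) →
      PySem.Dict String (PySem.Dict String (List (String × String)))
  | [], found => found
  | row :: rest, found =>
    let sensor := PySem.List.pyGetD row 3 ""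
    let found' :=
      match wanted.get? (PySem.List.pyGetD row 2 "") with
      | some ws =>
        if PySem.Set.contains ws sensor then
          let valores := found.getD (PySem.List.pyGetD row 2 "") PySem.Dict.empty   -- setdefault
          if valores.contains sensor then found
          else found.insert (PySem.List.pyGetD row 2 "") (valores.insert sensor
            [("valor", PySem.List.pyGetD row 4 ""), ("fecha", PySem.List.pyGetD row 0 ""), ("hora", PySem.List.pyGetD row 1 "")])
        else found
      | none => found
    altPass wanted rest found'

def getNewData_alt (archivo : List (List String)) (subs : List (String × List String)) :
    List (String × List (String × List (String × String))) :=
  let found := altPass (altWanted subs) archivo.reverse PySem.Dict.empty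
  (subs.foldl (fun res p =>
      match found.get? p.1 with
      | some v => res.insert p.1 v.items
      | none => res)
    PySem.Dict.empty).items

-- ===== PRECONDITION & SPEC =====
-- Pre_ excludes (i) archivo rows too short for A's row[2]/row[3]/row[4] indexing — there A raises IndexError, or returns only because its
-- early 'break' skipped the short row, where B's full pass raises — and (ii) subs with duplicate plc keys, which a Python dict cannot carry.
def Pre_getNewData (archivo : List (List String)) (subs : List (String × List String)) : Prop :=
  (∀ row ∈ archivo, 4 ≤ row.length ∧
      ((∃ p ∈ subs, PySem.List.pyGetD row 2 "" = p.1 ∧ PySem.List.pyGetD row 3 "" ∈ p.2) → 5 ≤ row.length)) ∧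
  (subs.map Prod.fst).Nodup
instance (archivo : List (List String)) (subs : List (String × List String)) : Decidable (Pre_getNewData archivo subs) := by unfold Pre_getNewData; infer_instance

def pvWitness_getNewData : List (List String) × (List (String × List String)) :=
  ([["d1", "h1", "p1", "s1", "7"], ["d2", "h2", "p1", "s1", "9"]], [("p1", ["s1", "s2"]), ("p2", ["s1"])])

def Spec_getNewData (archivo : List (List String)) (subs : List (String × List String)) (out : List (String × List (String × List (String × String)))) : Prop := out = getNewData_alt archivo subs
instance (archivo : List (List String)) (subs : List (String × List String)) (out : List (String × List (String × List (String × String)))) : Decidable (Spec_getNewData archivo subs out) := by unfold Spec_getNewData; infer_instance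

-- ===== CLAIM (what is proved, stated in full; the proofs are below) =====
def Claim_equal_getNewData : Prop := ∀ (archivo : List (List String)) (subs : List (String × List String)), Dom_getNewData archivo subs → Pre_getNewData archivo subs → Spec_getNewData archivo subs (getNewData archivo subs)

-- ===== LEMMAS AND PROOFS =====

def pvAStep (plc : String) (sens : List String)
    (val : PySem.Dict String (List (String × String))) (row : List String) :
    PySem.Dict String (List (String × String)) :=
  if (PySem.List.pyGetD row 2 "" == plc) && sens.contains (PySem.List.pyGetD row 3 "") then
    if val.contains (PySem.List.pyGetD row 3 "") then val
    else val.insert (PySem.List.pyGetD row 3 "")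
      [("valor", PySem.List.pyGetD row 4 ""), ("fecha", PySem.List.pyGetD row 0 ""), ("hora", PySem.List.pyGetD row 1 "")]
  else val

def pvAFull (plc : String) (sens : List String) (rows : List (List String))
    (val : PySem.Dict String (List (String × String))) : PySem.Dict String (List (String × String)) :=
  rows.foldl (pvAStep plc sens) val

lemma pvAStep_saturated (plc : String) (sens : List String) (val) (row)
    (h : ∀ x ∈ sens, val.contains x = true) : pvAStep plc sens val row = val := by
  unfold pvAStep
  split_ifs with h1 h2
  · rfl
  · exact absurd (h _ (by simpa using (Bool.and_elim_right h1))) (by simp [h2])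
  · rfl

lemma pvAFull_saturated (plc : String) (sens : List String) (rows) (val)
    (h : ∀ x ∈ sens, val.contains x = true) : pvAFull plc sens rows val = val := by
  induction rows with
  | nil => rfl
  | cons r rs ih => simp [pvAFull, List.foldl_cons, pvAStep_saturated _ _ _ _ h] at ih ⊢; exact ih

lemma pv_keys_length (val : PySem.Dict String (List (String × String))) : val.keys.length = val.size := by
  simp [PySem.Dict.keys, PySem.Dict.size]

lemma pv_saturation_of_size (sens : List String) (val : PySem.Dict String (List (String × String)))
    (hnd : val.keys.Nodup) (hsub : ∀ k ∈ val.keys, k ∈ sens) (hlen : val.size = sens.length) :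
    ∀ x ∈ sens, val.contains x = true := by
  intro x hx
  have hsubF : val.keys.toFinset ⊆ sens.toFinset := by
    intro a ha; simp only [List.mem_toFinset] at *; exact hsub a ha
  have h1 : val.keys.toFinset.card = val.keys.length := List.toFinset_card_of_nodup hnd
  have h2 : sens.toFinset.card ≤ sens.length := sens.toFinset_card_le
  have h3 := pv_keys_length val
  have hcard : sens.toFinset.card ≤ val.keys.toFinset.card := by omega
  have heq : val.keys.toFinset = sens.toFinset := Finset.eq_of_subset_of_card_le hsubF hcard
  have hxk : x ∈ val.keys := by
    have : x ∈ val.keys.toFinset := by rw [heq]; simpa using hx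
    simpa using this
  exact (PySem.Dict.contains_iff_mem_keys _ _).2 hxk

lemma pvAStep_inv (plc : String) (sens : List String) (val) (row)
    (hnd : val.keys.Nodup) (hsub : ∀ k ∈ val.keys, k ∈ sens) :
    (pvAStep plc sens val row).keys.Nodup ∧ ∀ k ∈ (pvAStep plc sens val row).keys, k ∈ sens := by
  unfold pvAStep
  split_ifs with h1 h2
  · exact ⟨hnd, hsub⟩
  · refine ⟨PySem.Dict.nodup_keys_insert _ _ _ hnd, ?_⟩
    intro k hk
    rcases (PySem.Dict.mem_keys_insert _ _ _ _).1 hk with h | h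
    · subst h; simpa using (Bool.and_elim_right h1)
    · exact hsub k h
  · exact ⟨hnd, hsub⟩


lemma pvInner_eq_full (plc : String) (sens : List String) : ∀ (rows : List (List String)) (val),
    val.keys.Nodup → (∀ k ∈ val.keys, k ∈ sens) →
    getNewDataInner plc sens rows val = pvAFull plc sens rows val := by
  intro rows
  induction rows with
  | nil => intro val _ _; rfl
  | cons row rest ih =>
    intro val hnd hsub
    obtain ⟨hnd', hsub'⟩ := pvAStep_inv plc sens val row hnd hsub
    show (if (pvAStep plc sens val row).size == sens.length then pvAStep plc sens val row
          else getNewDataInner plc sens rest (pvAStep plc sens val row)) = pvAFull plc sens rest (pvAStep plc sens val row)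
    split_ifs with hb
    · exact (pvAFull_saturated _ _ _ _ (pv_saturation_of_size sens _ hnd' hsub' (by simpa using hb))).symm
    · exact ih _ hnd' hsub'

lemma pvAStep_ne_empty (plc : String) (sens : List String) (val) (row)
    (h : val.items ≠ []) : (pvAStep plc sens val row).items ≠ [] := by
  unfold pvAStep
  split_ifs with h1 h2
  · exact h
  · simp only [PySem.Dict.items_insert]
    split_ifs
    all_goals simp_all
  · exact h

lemma pvAFull_ne_empty (plc : String) (sens : List String) (rows) (val)
    (h : val.items ≠ []) : (pvAFull plc sens rows val).items ≠ [] := by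
  induction rows generalizing val with
  | nil => exact h
  | cons r rs ih => exact ih _ (pvAStep_ne_empty plc sens val r h)

lemma pvWanted_skip (l : List (String × List String)) (k : String) :
    ∀ (d : PySem.Dict String (PySem.Set String)), k ∉ l.map Prod.fst →
    (l.foldl (fun d p => d.insert p.1 (PySem.Set.ofList p.2)) d).get? k = d.get? k := by
  induction l with
  | nil => intro d _; rfl
  | cons q rest ih =>
    intro d hk
    simp only [List.map_cons, List.mem_cons] at hk
    rw [not_or] at hk
    rw [List.foldl_cons, ih _ hk.2, PySem.Dict.get?_insert_of_ne _ _ hk.1]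

lemma pvWanted_get? (l : List (String × List String)) :
    ∀ (d : PySem.Dict String (PySem.Set String)) (p : String × List String), p ∈ l → (l.map Prod.fst).Nodup →
    (l.foldl (fun d p => d.insert p.1 (PySem.Set.ofList p.2)) d).get? p.1 = some (PySem.Set.ofList p.2) := by
  induction l with
  | nil => intro _ p hp; exact absurd hp (List.not_mem_nil)
  | cons q rest ih =>
    intro d p hp hnd
    simp only [List.map_cons, List.nodup_cons] at hnd
    rcases List.mem_cons.1 hp with h | h
    · subst h
      rw [List.foldl_cons, pvWanted_skip rest p.1 _ hnd.1, PySem.Dict.get?_insert_self]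
    · exact ih _ p h hnd.2


lemma pvPass_get? (wanted : PySem.Dict String (PySem.Set String)) (plc : String) (sens : List String)
    (hw : wanted.get? plc = some (PySem.Set.ofList sens)) :
    ∀ (rows : List (List String)) (found : PySem.Dict String (PySem.Dict String (List (String × String)))),
    (altPass wanted rows found).get? plc =
      match found.get? plc with
      | some v0 => some (pvAFull plc sens rows v0)
      | none =>
        if (pvAFull plc sens rows PySem.Dict.empty).items.isEmpty then none
        else some (pvAFull plc sens rows PySem.Dict.empty) := by
  intro rows
  induction rows with
  | nil =>
    intro found
    cases hfp : found.get? plc with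
    | some v0 => simp [altPass, hfp, pvAFull]
    | none => simp [altPass, hfp, pvAFull, show (PySem.Dict.empty : PySem.Dict String (List (String × String))).items = [] from rfl]
  | cons row rest ih =>
    intro found
    by_cases hp : PySem.List.pyGetD row 2 "" = plc
    · -- row addresses our plc
      by_cases hs : PySem.List.pyGetD row 3 "" ∈ sens
      · -- subscribed sensor
        cases hfp : found.get? plc with
        | some v0 =>
          have hgd : found.getD plc PySem.Dict.empty = v0 := by
            rw [PySem.Dict.getD_eq_get?_getD, hfp]; rfl
          by_cases hcs : v0.contains (PySem.List.pyGetD row 3 "") = true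
          · have : altPass wanted (row :: rest) found = altPass wanted rest found := by
              simp [altPass, hp, hw, hgd, hcs, hs]
            rw [this, ih found, hfp]
            have hstep : pvAStep plc sens v0 row = v0 := by
              simp [pvAStep, hp, hs, hcs]
            simp [pvAFull, hstep]
          · have : altPass wanted (row :: rest) found
                = altPass wanted rest (found.insert plc (v0.insert (PySem.List.pyGetD row 3 "")
                    [("valor", PySem.List.pyGetD row 4 ""), ("fecha", PySem.List.pyGetD row 0 ""), ("hora", PySem.List.pyGetD row 1 "")])) := by
              simp [altPass, hp, hw, hgd, hcs, hs]
            rw [this, ih, PySem.Dict.get?_insert_self]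
            have hstep : pvAStep plc sens v0 row = v0.insert (PySem.List.pyGetD row 3 "")
                [("valor", PySem.List.pyGetD row 4 ""), ("fecha", PySem.List.pyGetD row 0 ""), ("hora", PySem.List.pyGetD row 1 "")] := by
              simp [pvAStep, hp, hs, hcs]
            simp [pvAFull, hstep]
        | none =>
          have hgd : found.getD plc PySem.Dict.empty = PySem.Dict.empty := by
            rw [PySem.Dict.getD_eq_get?_getD, hfp]; rfl
          have hce : (PySem.Dict.empty : PySem.Dict String (List (String × String))).contains (PySem.List.pyGetD row 3 "") = false :=
            PySem.Dict.contains_empty _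
          have hthis : altPass wanted (row :: rest) found
              = altPass wanted rest (found.insert plc ((PySem.Dict.empty : PySem.Dict String (List (String × String))).insert (PySem.List.pyGetD row 3 "")
                  [("valor", PySem.List.pyGetD row 4 ""), ("fecha", PySem.List.pyGetD row 0 ""), ("hora", PySem.List.pyGetD row 1 "")])) := by
            simp [altPass, hp, hw, hgd, hce, hs]
          have hstep : pvAStep plc sens PySem.Dict.empty row
              = (PySem.Dict.empty : PySem.Dict String (List (String × String))).insert (PySem.List.pyGetD row 3 "")
                  [("valor", PySem.List.pyGetD row 4 ""), ("fecha", PySem.List.pyGetD row 0 ""), ("hora", PySem.List.pyGetD row 1 "")] := by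
            simp [pvAStep, hp, hs, hce]
          have hne : (pvAFull plc sens (row :: rest) PySem.Dict.empty).items ≠ [] := by
            have : (pvAStep plc sens PySem.Dict.empty row).items ≠ [] := by
              rw [hstep, PySem.Dict.items_insert]
              simp [hce, show (PySem.Dict.empty : PySem.Dict String (List (String × String))).items = [] from rfl]
            simpa [pvAFull, List.foldl_cons] using pvAFull_ne_empty plc sens rest _ this
          rw [hthis, ih, PySem.Dict.get?_insert_self]
          simp only [pvAFull, List.foldl_cons, hstep] at hne ⊢
          rw [if_neg (by simpa using hne)]
      · -- sensor not subscribed: both sides ignore the row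
        have hnc : PySem.Set.contains (PySem.Set.ofList sens) (PySem.List.pyGetD row 3 "") = false := by
          simp [PySem.Set.contains_eq_listContains]
          simpa using hs
        have hthis : altPass wanted (row :: rest) found = altPass wanted rest found := by
          simp [altPass, hp, hw]
          rw [if_neg hs]
        have hstep : ∀ v, pvAStep plc sens v row = v := by
          intro v; simp [pvAStep, hp]
          intro h; exact absurd (by simpa using h) hs
        rw [hthis, ih]
        cases hfp : found.get? plc <;> simp [pvAFull, hstep]
    · -- row addresses a different plc: our entry is untouched
      have hstep : ∀ v, pvAStep plc sens v row = v := by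
        intro v; simp [pvAStep]
        intro h; exact absurd h hp
      have hget : (match wanted.get? (PySem.List.pyGetD row 2 "") with
          | some ws =>
            if PySem.Set.contains ws (PySem.List.pyGetD row 3 "") then
              if (found.getD (PySem.List.pyGetD row 2 "") PySem.Dict.empty).contains (PySem.List.pyGetD row 3 "") then found
              else found.insert (PySem.List.pyGetD row 2 "") ((found.getD (PySem.List.pyGetD row 2 "") PySem.Dict.empty).insert (PySem.List.pyGetD row 3 "")
                [("valor", PySem.List.pyGetD row 4 ""), ("fecha", PySem.List.pyGetD row 0 ""), ("hora", PySem.List.pyGetD row 1 "")])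
            else found
          | none => found).get? plc = found.get? plc := by
        cases wanted.get? (PySem.List.pyGetD row 2 "") with
        | none => rfl
        | some ws =>
          dsimp only
          split_ifs
          · rfl
          · exact PySem.Dict.get?_insert_of_ne _ _ (fun h => hp h.symm)
          · rfl
      have hthis : altPass wanted (row :: rest) found
          = altPass wanted rest (match wanted.get? (PySem.List.pyGetD row 2 "") with
            | some ws =>
              if PySem.Set.contains ws (PySem.List.pyGetD row 3 "") then
                if (found.getD (PySem.List.pyGetD row 2 "") PySem.Dict.empty).contains (PySem.List.pyGetD row 3 "") then found
                else found.insert (PySem.List.pyGetD row 2 "") ((found.getD (PySem.List.pyGetD row 2 "") PySem.Dict.empty).insert (PySem.List.pyGetD row 3 "")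
                  [("valor", PySem.List.pyGetD row 4 ""), ("fecha", PySem.List.pyGetD row 0 ""), ("hora", PySem.List.pyGetD row 1 "")])
              else found
            | none => found) := rfl
      rw [hthis, ih, hget]
      cases hfp : found.get? plc <;> simp [pvAFull, hstep]




theorem pv_main (archivo : List (List String)) (subs : List (String × List String))
    (hnd : (subs.map Prod.fst).Nodup) : getNewData archivo subs = getNewData_alt archivo subs := by
  unfold getNewData getNewData_alt
  refine congrArg PySem.Dict.items ?_
  apply PySem.List.foldl_congr_mem
  intro acc p hp
  have hw : (altWanted subs).get? p.1 = some (PySem.Set.ofList p.2) :=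
    pvWanted_get? subs PySem.Dict.empty p hp hnd
  have hpass := pvPass_get? (altWanted subs) p.1 p.2 hw archivo.reverse PySem.Dict.empty
  rw [PySem.Dict.get?_empty] at hpass
  have hinner : getNewDataInner p.1 p.2 archivo.reverse PySem.Dict.empty
      = pvAFull p.1 p.2 archivo.reverse PySem.Dict.empty :=
    pvInner_eq_full p.1 p.2 archivo.reverse PySem.Dict.empty PySem.Dict.nodup_keys_empty
      (by simp [PySem.Dict.keys_empty])
  simp only [hinner, hpass]
  by_cases hE : (pvAFull p.1 p.2 archivo.reverse PySem.Dict.empty).items.isEmpty = true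
  · simp [hE]
  · simp only [Bool.not_eq_true] at hE
    simp [hE]

-- ===== VERDICT (by name: the statement is the Claim_ definition above) =====
theorem getNewData_spec : Claim_equal_getNewData := by
  intro archivo subs _ hpre
  show getNewData archivo subs = getNewData_alt archivo subs
  exact pv_main archivo subs hpre.2
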